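-- pv_equiv track=rewrite | github.com/MrClockOrange/passtats | main.py | compute
-- ===== SOURCE A (Python) =====
-- def compute(raw_dists, raw_alts):
--     new_dists = []
--     new_alts = []
--     new_alts_delta = []
--     new_tot_dist = []
--     new_tot_alt = []
--     j, delta_d, delta_a, tot, totalt = 0, 0, 0, 0, 0
--     while j < len(raw_dists) :
--         delta_d += raw_dists[j]
--         delta_a += raw_alts[j]
--         j += 1
--         if delta_d > 200 or j == len(raw_dists) - 1:
--             new_dists.append(delta_d)
--             new_alts_delta.append(delta_a)
--             tot += delta_d
--             totalt += delta_a
--             new_tot_dist.append(tot)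
--             new_tot_alt.append(totalt)
--             new_alts.append(totalt)
--             delta_d, delta_a = 0, 0
--
--     return new_tot_dist, new_tot_alt, new_dists, new_alts_delta
-- ===== SOURCE B (Python) =====
-- def _running_sums(xs):
--     out = []
--     t = 0
--     for x in xs:
--         t += x
--         out.append(t)
--     return out
--
--
-- def compute(raw_dists, raw_alts):
--     # Pass 1: segmentation only (same flush condition as the original,
--     # including its pre-increment comparison against len-1).
--     new_dists = []
--     new_alts_delta = []
--     delta_d = delta_a = 0
--     n = len(raw_dists)
--     j = 0
--     for d, a in zip(raw_dists, raw_alts):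
--         delta_d += d
--         delta_a += a
--         j += 1
--         if delta_d > 200 or j == n - 1:
--             new_dists.append(delta_d)
--             new_alts_delta.append(delta_a)
--             delta_d = delta_a = 0
--     # Pass 2: cumulative totals over the chunk deltas.
--     return _running_sums(new_dists), _running_sums(new_alts_delta), new_dists, new_alts_delta
-- ===== Notes on version B (the rewrite author's own statement) =====
-- stated objective: simpler
-- what changed: B separates segmentation from totalling: one pass over zip(raw_dists, raw_alts) collects only the chunk deltas (same flush condition), and the cumulative-total lists are produced afterwards by a small running-sum helper, instead of A's single fused loop maintaining five output lists and two running totals (A's dead new_alts list is dropped).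
import Mathlib
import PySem

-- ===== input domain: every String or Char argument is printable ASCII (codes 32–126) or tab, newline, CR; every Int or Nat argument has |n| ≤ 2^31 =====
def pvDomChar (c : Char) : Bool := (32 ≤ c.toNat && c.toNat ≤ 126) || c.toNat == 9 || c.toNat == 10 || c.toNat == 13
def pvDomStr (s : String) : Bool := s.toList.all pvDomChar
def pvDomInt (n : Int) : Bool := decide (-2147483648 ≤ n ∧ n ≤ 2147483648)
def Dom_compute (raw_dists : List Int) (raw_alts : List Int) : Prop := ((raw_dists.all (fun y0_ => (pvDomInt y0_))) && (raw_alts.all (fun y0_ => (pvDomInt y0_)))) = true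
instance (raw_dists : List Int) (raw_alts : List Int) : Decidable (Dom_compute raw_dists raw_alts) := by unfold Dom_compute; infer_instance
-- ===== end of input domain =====

-- B separates segmentation (one pass collecting chunk deltas) from the cumulative totals
-- (a second running-sum pass), instead of A's single fused loop; return values are equal
-- whenever raw_alts is at least as long as raw_dists (otherwise A raises IndexError).


-- ===== PORT A =====
-- While loop of A, recursing on the index j; the nine loop variables are carried as
-- arguments (new_alts is A's dead accumulator, computed but not returned).
-- Indexing uses getD 0: inside Pre_compute both indexings are always in range.
def computeLoopA (rd ra : List Int) (j : Nat) (dd da tot totalt : Int)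
    (ntd nta nd nad nalts : List Int) : List Int × List Int × List Int × List Int :=
  if _h : j < rd.length then
    let dd' := dd + rd.getD j 0
    let da' := da + ra.getD j 0
    let j' := j + 1
    if dd' > 200 ∨ j' = rd.length - 1 then
      computeLoopA rd ra j' 0 0 (tot + dd') (totalt + da')
        (ntd ++ [tot + dd']) (nta ++ [totalt + da'])
        (nd ++ [dd']) (nad ++ [da']) (nalts ++ [totalt + da'])
    else
      computeLoopA rd ra j' dd' da' tot totalt ntd nta nd nad nalts
  else (ntd, nta, nd, nad)
termination_by rd.length - j
decreasing_by all_goals omega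

def compute (raw_dists : List Int) (raw_alts : List Int) : List Int × List Int × List Int × List Int :=
  computeLoopA raw_dists raw_alts 0 0 0 0 0 [] [] [] [] []

-- ===== PORT B =====
-- Pass 1 of B: walk zip(raw_dists, raw_alts) with the running chunk deltas,
-- emitting (new_dists, new_alts_delta) front-to-back.
def computeSegs (n : Nat) (pairs : List (Int × Int)) (j : Nat) (dd da : Int) : List Int × List Int :=
  match pairs with
  | [] => ([], [])
  | (d, a) :: rest =>
    let dd' := dd + d
    let da' := da + a
    let j' := j + 1
    if dd' > 200 ∨ j' = n - 1 then
      let rec_ := computeSegs n rest j' 0 0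
      (dd' :: rec_.1, da' :: rec_.2)
    else
      computeSegs n rest j' dd' da'

-- Pass 2 of B: running sums (_running_sums in Source B).
def runningSums (t : Int) : List Int → List Int
  | [] => []
  | x :: xs => (t + x) :: runningSums (t + x) xs

def compute_alt (raw_dists : List Int) (raw_alts : List Int) : List Int × List Int × List Int × List Int :=
  let segs := computeSegs raw_dists.length (raw_dists.zip raw_alts) 0 0 0
  (runningSums 0 segs.1, runningSums 0 segs.2, segs.1, segs.2)

-- ===== PRECONDITION & SPEC =====
-- Pre_ excludes exactly the inputs where A raises IndexError: raw_alts shorter than raw_dists.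
def Pre_compute (raw_dists : List Int) (raw_alts : List Int) : Prop :=
  raw_dists.length ≤ raw_alts.length
instance (raw_dists : List Int) (raw_alts : List Int) : Decidable (Pre_compute raw_dists raw_alts) := by unfold Pre_compute; infer_instance
def pvWitness_compute : List Int × List Int := ([100, 150, 30], [5, -3, 7])

def Spec_compute (raw_dists : List Int) (raw_alts : List Int) (out : List Int × List Int × List Int × List Int) : Prop := out = compute_alt raw_dists raw_alts
instance (raw_dists : List Int) (raw_alts : List Int) (out : List Int × List Int × List Int × List Int) : Decidable (Spec_compute raw_dists raw_alts out) := by unfold Spec_compute; infer_instance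

-- ===== CLAIM (what is proved, stated in full; the proofs are below) =====
def Claim_equal_compute : Prop := ∀ (raw_dists : List Int) (raw_alts : List Int), Dom_compute raw_dists raw_alts → Pre_compute raw_dists raw_alts → Spec_compute raw_dists raw_alts (compute raw_dists raw_alts)

-- ===== LEMMAS AND PROOFS =====

theorem runningSums_cons (t x : Int) (xs : List Int) :
    runningSums t (x :: xs) = (t + x) :: runningSums (t + x) xs := rfl

-- Main invariant: A's loop from index j equals B's two passes over the remaining suffix,
-- appended after the already-emitted prefixes.
theorem loop_invariant (rd ra : List Int) (hlen : rd.length ≤ ra.length)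
    (j : Nat) (dd da tot totalt : Int) (ntd nta nd nad nalts : List Int) :
    computeLoopA rd ra j dd da tot totalt ntd nta nd nad nalts =
      (ntd ++ runningSums tot (computeSegs rd.length ((rd.drop j).zip (ra.drop j)) j dd da).1,
       nta ++ runningSums totalt (computeSegs rd.length ((rd.drop j).zip (ra.drop j)) j dd da).2,
       nd ++ (computeSegs rd.length ((rd.drop j).zip (ra.drop j)) j dd da).1,
       nad ++ (computeSegs rd.length ((rd.drop j).zip (ra.drop j)) j dd da).2) := by
  have key : ∀ (n jj : Nat), rd.length - jj = n →
      ∀ (dd da tot totalt : Int) (ntd nta nd nad nalts : List Int),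
      computeLoopA rd ra jj dd da tot totalt ntd nta nd nad nalts =
        (ntd ++ runningSums tot (computeSegs rd.length ((rd.drop jj).zip (ra.drop jj)) jj dd da).1,
         nta ++ runningSums totalt (computeSegs rd.length ((rd.drop jj).zip (ra.drop jj)) jj dd da).2,
         nd ++ (computeSegs rd.length ((rd.drop jj).zip (ra.drop jj)) jj dd da).1,
         nad ++ (computeSegs rd.length ((rd.drop jj).zip (ra.drop jj)) jj dd da).2) := by
    intro n
    induction n with
    | zero =>
      intro jj hjj dd da tot totalt ntd nta nd nad nalts
      have hge : rd.length ≤ jj := by omega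
      rw [computeLoopA]
      simp [Nat.not_lt.mpr hge, List.drop_eq_nil_of_le hge, computeSegs, runningSums]
    | succ m ih =>
      intro jj hjj dd da tot totalt ntd nta nd nad nalts
      have hlt : jj < rd.length := by omega
      have hlt' : jj < ra.length := by omega
      have hdrd : rd.drop jj = rd[jj] :: rd.drop (jj + 1) := List.drop_eq_getElem_cons hlt
      have hdra : ra.drop jj = ra[jj] :: ra.drop (jj + 1) := List.drop_eq_getElem_cons hlt'
      have hgd : rd.getD jj 0 = rd[jj] := List.getD_eq_getElem rd 0 hlt
      have hga : ra.getD jj 0 = ra[jj] := List.getD_eq_getElem ra 0 hlt'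
      have hm : rd.length - (jj + 1) = m := by omega
      rw [computeLoopA]
      rw [hdrd, hdra]
      simp only [List.zip_cons_cons, computeSegs, dif_pos hlt, hgd, hga]
      by_cases hc : dd + rd[jj] > 200 ∨ jj + 1 = rd.length - 1
      · simp only [if_pos hc, ih (jj + 1) hm, runningSums_cons]
        simp
      · simp only [if_neg hc, ih (jj + 1) hm]
  simpa using key (rd.length - j) j rfl dd da tot totalt ntd nta nd nad nalts

theorem compute_spec : Claim_equal_compute := by
  intro rd ra _ hpre
  unfold Spec_compute compute compute_alt
  have h := loop_invariant rd ra hpre 0 0 0 0 0 [] [] [] [] []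
  simpa using h
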